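-- pv_equiv track=rewrite | github.com/japan1988/multi-agent-mediation | archive/orchestrator_versions/ai_doc_orchestrator_kage3_v1_2_2.py | _meaning_gate
-- ===== SOURCE A (Python) =====
-- from typing import Any, Dict, List, Literal, Optional, Tuple
--
-- Decision = Literal["RUN", "HITL", "STOP"]
--
-- Layer = Literal["meaning", "consistency", "ethics", "orchestrator", "agent"]
--
-- KIND = Literal["excel", "word", "ppt"]
--
-- _KIND_TOKENS: Dict[KIND, List[str]] = {
--     "excel": ["excel", "xlsx", "表", "列", "columns", "table"],
--     "word": ["word", "docx", "見出し", "章", "アウトライン", "outline", "document"],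
--     "ppt":  ["ppt", "pptx", "powerpoint", "スライド", "slides", "slide"],
-- }
--
-- def _prompt_mentions_any_kind(prompt: str) -> bool:
--     p = (prompt or "").lower()
--     for toks in _KIND_TOKENS.values():
--         for t in toks:
--             if t.lower() in p:
--                 return True
--     return False
--
-- def _meaning_gate(prompt: str, kind: KIND) -> Tuple[Decision, Optional[Layer], str]:
--     p = (prompt or "")
--     pl = p.lower()
--     any_kind = _prompt_mentions_any_kind(p)
--
--     if not any_kind:
--         return "RUN", None, "MEANING_GENERIC_ALLOW_ALL"
--
--     tokens = _KIND_TOKENS[kind]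
--     if any(t.lower() in pl for t in tokens):
--         return "RUN", None, "MEANING_KIND_MATCH"
--
--     return "HITL", "meaning", "MEANING_KIND_MISSING"
-- ===== SOURCE B (Python) =====
-- from typing import Dict, List
--
-- _KIND_TOKENS: Dict[str, List[str]] = {
--     "excel": ["excel", "xlsx", "表", "列", "columns", "table"],
--     "word": ["word", "docx", "見出し", "章", "アウトライン", "outline", "document"],
--     "ppt":  ["ppt", "pptx", "powerpoint", "スライド", "slides", "slide"],
-- }
--
-- def _meaning_gate(prompt, kind):
--     # Position-driven multi-pattern scan: walk the lowercased prompt once; at each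
--     # position record every kind one of whose tokens starts there, then decide from
--     # the set of kinds found.
--     pl = (prompt or "").lower()
--     found = set()
--     for i in range(len(pl)):
--         for k, toks in _KIND_TOKENS.items():
--             if any(pl.startswith(t.lower(), i) for t in toks):
--                 found.add(k)
--     if not found:
--         return "RUN", None, "MEANING_GENERIC_ALLOW_ALL"
--     if kind in found:
--         return "RUN", None, "MEANING_KIND_MATCH"
--     return "HITL", "meaning", "MEANING_KIND_MISSING"
-- ===== Notes on version B (the rewrite author's own statement) =====
-- stated objective: alternative
-- what changed: B replaces A's token-driven substring scans ('t in pl' per token, twice) by a position-driven multi-pattern scan: it walks the lowercased prompt once and at each position records every kind one of whose tokens starts there, then decides by emptiness/membership of the resulting set.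
import Mathlib
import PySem

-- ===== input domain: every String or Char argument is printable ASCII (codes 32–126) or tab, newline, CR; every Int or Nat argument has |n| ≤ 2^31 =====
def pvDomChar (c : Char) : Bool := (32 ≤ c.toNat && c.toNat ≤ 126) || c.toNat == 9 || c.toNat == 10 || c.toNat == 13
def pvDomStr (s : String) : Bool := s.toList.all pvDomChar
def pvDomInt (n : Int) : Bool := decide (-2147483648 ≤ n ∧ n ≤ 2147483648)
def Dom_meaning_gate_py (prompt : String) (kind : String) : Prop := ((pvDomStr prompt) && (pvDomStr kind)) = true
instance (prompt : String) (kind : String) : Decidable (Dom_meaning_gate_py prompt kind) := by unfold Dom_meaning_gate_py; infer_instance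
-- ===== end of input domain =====

-- B replaces A's token-driven substring scans by a position-driven multi-pattern scan: it walks the
-- lowercased prompt left to right once, at each position records every kind a token of which starts
-- there, then decides by emptiness/membership of that set (alternative algorithm, same cost class).
-- Pre_ excludes exactly the inputs where A raises KeyError (unknown kind while the prompt mentions
-- some kind's token).


-- ===== PORT A =====
-- _KIND_TOKENS (shared module constant; a dict as an association list in insertion order)
def pvKindTokens : PySem.Dict String (List String) :=
  PySem.Dict.ofList
  [("excel", ["excel", "xlsx", "表", "列", "columns", "table"]),
   ("word", ["word", "docx", "見出し", "章", "アウトライン", "outline", "document"]),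
   ("ppt",  ["ppt", "pptx", "powerpoint", "スライド", "slides", "slide"])]

-- _prompt_mentions_any_kind: the nested for/return-True loop is the `any` over values then tokens
def promptMentionsAnyKind (prompt : String) : Bool :=
  let p := PySem.Str.lower (if prompt == "" then "" else prompt)
  (PySem.Dict.values pvKindTokens).any (fun toks =>
    List.any toks (fun t => PySem.Str.isIn (PySem.Str.lower t) p))

def meaning_gate_py (prompt : String) (kind : String) : String × Option String × String :=
  let p := if prompt == "" then "" else prompt
  let pl := PySem.Str.lower p
  let anyKind := promptMentionsAnyKind p
  if !anyKind then ("RUN", none, "MEANING_GENERIC_ALLOW_ALL")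
  else
    -- _KIND_TOKENS[kind]: KeyError (get? = none) is excluded by Pre_; getD [] only pads the type
    let tokens := (PySem.Dict.get? pvKindTokens kind).getD []
    if tokens.any (fun t => PySem.Str.isIn (PySem.Str.lower t) pl) then
      ("RUN", none, "MEANING_KIND_MATCH")
    else ("HITL", some "meaning", "MEANING_KIND_MISSING")

-- ===== PORT B =====
-- Source B: pl as a char list; for i in range(len(pl)): for (k, toks) in items:
-- if any(pl.startswith(t.lower(), i)): found.add(k)
-- (Python's s.startswith(p, i) with 0 ≤ i < len(s) is exactly startswith on (s.drop i))
def meaning_gate_py_alt (prompt : String) (kind : String) : String × Option String × String :=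
  let pl : List Char := PySem.Chars.lower (if prompt == "" then "" else prompt).toList
  let found : PySem.Set String :=
    (List.range pl.length).foldl (fun s i =>
      pvKindTokens.items.foldl (fun s kv =>
        if kv.2.any (fun t => PySem.Chars.startswith (pl.drop i) (PySem.Chars.lower t.toList))
        then PySem.Set.add s kv.1 else s) s)
      PySem.Set.empty
  if found = [] then ("RUN", none, "MEANING_GENERIC_ALLOW_ALL")
  else if PySem.Set.contains found kind then ("RUN", none, "MEANING_KIND_MATCH")
  else ("HITL", some "meaning", "MEANING_KIND_MISSING")

-- ===== PRECONDITION & SPEC =====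
-- helper used only by Pre_: does the lowercased prompt contain any token of the table?
def pvAllKindTokens : List String :=
  ["excel", "xlsx", "表", "列", "columns", "table",
   "word", "docx", "見出し", "章", "アウトライン", "outline", "document",
   "ppt", "pptx", "powerpoint", "スライド", "slides", "slide"]
def pvMentionsAny (prompt : String) : Bool :=
  pvAllKindTokens.any (fun t => PySem.Str.isIn (PySem.Str.lower t) (PySem.Str.lower prompt))

-- Pre_ excludes exactly the inputs where A raises KeyError: kind outside the token table while the
-- prompt mentions some kind's token.
def Pre_meaning_gate_py (prompt : String) (kind : String) : Prop :=
  kind = "excel" ∨ kind = "word" ∨ kind = "ppt" ∨ pvMentionsAny prompt = false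
instance (prompt : String) (kind : String) : Decidable (Pre_meaning_gate_py prompt kind) := by
  unfold Pre_meaning_gate_py; infer_instance

def pvWitness_meaning_gate_py : String × String := ("make an excel table", "excel")

def Spec_meaning_gate_py (prompt : String) (kind : String) (out : String × Option String × String) : Prop := out = meaning_gate_py_alt prompt kind
instance (prompt : String) (kind : String) (out : String × Option String × String) : Decidable (Spec_meaning_gate_py prompt kind out) := by unfold Spec_meaning_gate_py; infer_instance

-- ===== CLAIM (what is proved, stated in full; the proofs are below) =====
def Claim_equal_meaning_gate_py : Prop := ∀ (prompt : String) (kind : String), Dom_meaning_gate_py prompt kind → Pre_meaning_gate_py prompt kind → Spec_meaning_gate_py prompt kind (meaning_gate_py prompt kind)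

-- ===== LEMMAS AND PROOFS =====

-- `s or ""` for a string is `s` itself
theorem or_empty (s : String) : (if s == "" then "" else s) = s := by
  by_cases h : s = "" <;> simp [h]

theorem items_eq : pvKindTokens.items =
    [("excel", ["excel", "xlsx", "表", "列", "columns", "table"]),
     ("word", ["word", "docx", "見出し", "章", "アウトライン", "outline", "document"]),
     ("ppt",  ["ppt", "pptx", "powerpoint", "スライド", "slides", "slide"])] := by decide

-- no token of the table lowercases to the empty char list
theorem tokens_nonempty : ∀ kv ∈ pvKindTokens.items, ∀ t ∈ kv.2,
    PySem.Chars.lower t.toList ≠ [] := by decide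

-- membership in B's inner per-position fold
theorem mem_inner (L : List (String × List String)) (p : String × List String → Bool)
    (s : PySem.Set String) (y : String) :
    y ∈ L.foldl (fun s kv => if p kv then PySem.Set.add s kv.1 else s) s
      ↔ y ∈ s ∨ ∃ kv ∈ L, p kv = true ∧ kv.1 = y := by
  induction L generalizing s with
  | nil => simp
  | cons hd tl ih =>
    simp only [List.foldl_cons]
    by_cases hp : p hd = true
    · rw [if_pos hp, ih]
      simp [PySem.Set.mem_add, hp]
      tauto
    · rw [if_neg hp, ih]
      simp only [List.mem_cons]
      constructor
      · rintro (h | ⟨kv, hkv, hpk, hk⟩)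
        · exact Or.inl h
        · exact Or.inr ⟨kv, Or.inr hkv, hpk, hk⟩
      · rintro (h | ⟨kv, (rfl | hkv), hpk, hk⟩)
        · exact Or.inl h
        · exact absurd hpk hp
        · exact Or.inr ⟨kv, hkv, hpk, hk⟩

-- membership in B's whole nested fold
theorem mem_outer (idxs : List Nat) (q : String × List String → Nat → Bool)
    (s : PySem.Set String) (y : String) :
    y ∈ idxs.foldl (fun s i =>
        pvKindTokens.items.foldl (fun s kv => if q kv i then PySem.Set.add s kv.1 else s) s) s
      ↔ y ∈ s ∨ ∃ i ∈ idxs, ∃ kv ∈ pvKindTokens.items, q kv i = true ∧ kv.1 = y := by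
  induction idxs generalizing s with
  | nil => simp
  | cons hd tl ih =>
    simp only [List.foldl_cons, ih, mem_inner, List.mem_cons]
    constructor
    · rintro ((h | ⟨kv, hkv, hq, hk⟩) | ⟨i, hi, kv, hkv, hq, hk⟩)
      · exact Or.inl h
      · exact Or.inr ⟨hd, Or.inl rfl, kv, hkv, hq, hk⟩
      · exact Or.inr ⟨i, Or.inr hi, kv, hkv, hq, hk⟩
    · rintro (h | ⟨i, (rfl | hi), kv, hkv, hq, hk⟩)
      · exact Or.inl (Or.inl h)
      · exact Or.inl (Or.inr ⟨kv, hkv, hq, hk⟩)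
      · exact Or.inr ⟨i, hi, kv, hkv, hq, hk⟩

-- a nonempty pattern occurs in pl iff it starts at some position < len(pl)
theorem exists_start_iff_isIn (pl sub : List Char) (hne : sub ≠ []) :
    (∃ i < pl.length, PySem.Chars.startswith (pl.drop i) sub = true)
      ↔ PySem.Chars.isIn sub pl = true := by
  rw [← PySem.Chars.exists_prefix_drop_iff_isIn]
  constructor
  · rintro ⟨i, _, hs⟩
    exact ⟨i, (PySem.Chars.startswith_iff _ _).mp hs⟩
  · rintro ⟨j, hj⟩
    by_cases hlt : j < pl.length
    · exact ⟨j, hlt, (PySem.Chars.startswith_iff _ _).mpr hj⟩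
    · exfalso
      rw [List.drop_eq_nil_of_le (Nat.le_of_not_lt hlt)] at hj
      exact hne (List.prefix_nil.mp hj)

-- per-entry bridge: A's `any(t in pl)` equals B's `∃ position where some token starts`
theorem entry_bridge (pl : List Char) (kv : String × List String) (hkv : kv ∈ pvKindTokens.items) :
    (∃ i < pl.length,
        kv.2.any (fun t => PySem.Chars.startswith (pl.drop i) (PySem.Chars.lower t.toList)) = true)
      ↔ kv.2.any (fun t => PySem.Chars.isIn (PySem.Chars.lower t.toList) pl) = true := by
  simp only [List.any_eq_true]
  constructor
  · rintro ⟨i, hi, t, ht, hs⟩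
    exact ⟨t, ht, (exists_start_iff_isIn pl _ (tokens_nonempty kv hkv t ht)).mp ⟨i, hi, hs⟩⟩
  · rintro ⟨t, ht, hin⟩
    obtain ⟨i, hi, hs⟩ := (exists_start_iff_isIn pl _ (tokens_nonempty kv hkv t ht)).mpr hin
    exact ⟨i, hi, t, ht, hs⟩

-- characterisation of B's `found` set
theorem mem_found (prompt : String) (y : String) :
    (y ∈ (List.range (PySem.Chars.lower (if prompt == "" then "" else prompt).toList).length).foldl
        (fun s i =>
          pvKindTokens.items.foldl (fun s kv =>
            if kv.2.any (fun t => PySem.Chars.startswith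
                ((PySem.Chars.lower (if prompt == "" then "" else prompt).toList).drop i)
                (PySem.Chars.lower t.toList))
            then PySem.Set.add s kv.1 else s) s)
        PySem.Set.empty)
      ↔ ∃ kv ∈ pvKindTokens.items, kv.1 = y ∧
          kv.2.any (fun t => PySem.Chars.isIn (PySem.Chars.lower t.toList)
            (PySem.Chars.lower (if prompt == "" then "" else prompt).toList)) = true := by
  set pl := PySem.Chars.lower (if prompt == "" then "" else prompt).toList with hpl
  rw [mem_outer (List.range pl.length)
      (fun kv i => kv.2.any (fun t => PySem.Chars.startswith (pl.drop i) (PySem.Chars.lower t.toList)))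
      PySem.Set.empty y]
  simp only [PySem.Set.empty, List.not_mem_nil, false_or, List.mem_range]
  constructor
  · rintro ⟨i, hi, kv, hkv, hq, hk⟩
    exact ⟨kv, hkv, hk, (entry_bridge pl kv hkv).mp ⟨i, hi, hq⟩⟩
  · rintro ⟨kv, hkv, hk, hin⟩
    obtain ⟨i, hi, hq⟩ := (entry_bridge pl kv hkv).mpr hin
    exact ⟨i, hi, kv, hkv, hq, hk⟩

-- A's token test on strings is the same predicate on char lists
theorem str_isIn_eq (t : String) (p : String) :
    PySem.Str.isIn (PySem.Str.lower t) (PySem.Str.lower p)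
      = PySem.Chars.isIn (PySem.Chars.lower t.toList) (PySem.Chars.lower p.toList) := by
  simp [pysem]

theorem all_tokens_sub : ∀ kv ∈ pvKindTokens.items, ∀ t ∈ kv.2, t ∈ pvAllKindTokens := by decide

theorem gate_eq' (prompt : String) (kind : String)
    (hpre : Pre_meaning_gate_py prompt kind) :
    meaning_gate_py prompt kind = meaning_gate_py_alt prompt kind := by
  have hm := mem_found prompt
  simp only [or_empty] at hm
  simp only [meaning_gate_py, meaning_gate_py_alt, promptMentionsAnyKind, or_empty,
    PySem.Dict.values, str_isIn_eq] at *
  set pl := PySem.Chars.lower prompt.toList with hpl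
  set g := fun (t : String) => PySem.Chars.isIn (PySem.Chars.lower t.toList) pl with hg
  set found := (List.range pl.length).foldl
      (fun s i => pvKindTokens.items.foldl (fun s kv =>
        if kv.2.any (fun t => PySem.Chars.startswith (pl.drop i) (PySem.Chars.lower t.toList))
        then PySem.Set.add s kv.1 else s) s) PySem.Set.empty with hfound
  by_cases hany : (pvKindTokens.items.map (fun x => x.2)).any (fun toks => toks.any g) = true
  · -- some kind mentioned
    have hex : ∃ kv ∈ pvKindTokens.items, kv.2.any g = true := by
      simpa [List.any_map] using hany
    have hne : ¬ (found = []) := by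
      intro h
      obtain ⟨kv, hkv, hkg⟩ := hex
      have : kv.1 ∈ found := (hm kv.1).mpr ⟨kv, hkv, rfl, hkg⟩
      rw [h] at this; exact List.not_mem_nil this
    rw [hany, if_neg hne]
    simp only [Bool.not_true, Bool.false_eq_true, if_false]
    -- Pre_: kind is a key, or no mention at all (contradiction with hany)
    have hkey : kind = "excel" ∨ kind = "word" ∨ kind = "ppt" := by
      rcases hpre with h | h | h | h
      · exact Or.inl h
      · exact Or.inr (Or.inl h)
      · exact Or.inr (Or.inr h)
      · exfalso
        obtain ⟨kv, hkv, hkg⟩ := hex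
        obtain ⟨t, ht, htg⟩ := List.any_eq_true.mp hkg
        have : PySem.Str.isIn (PySem.Str.lower t) (PySem.Str.lower prompt) = false := by
          have := List.any_eq_false.mp h _ (all_tokens_sub kv hkv t ht)
          simpa using this
        rw [str_isIn_eq] at this
        rw [hg] at htg; simp only at htg
        rw [this] at htg; cases htg
    have huniq : ∀ kv ∈ pvKindTokens.items, ∀ kv' ∈ pvKindTokens.items, kv.1 = kv'.1 → kv = kv' := by
      rw [items_eq]; decide
    have hcont : ∀ toks, (kind, toks) ∈ pvKindTokens.items →
        PySem.Set.contains found kind = toks.any g := by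
      intro toks hmemk
      cases hq : toks.any g with
      | true =>
        rw [PySem.Set.contains_iff, hm]
        exact ⟨(kind, toks), hmemk, rfl, hq⟩
      | false =>
        rw [Bool.eq_false_iff]
        intro hc
        obtain ⟨kv, hkv, hk1, hkg⟩ := (hm kind).mp ((PySem.Set.contains_iff _ _).mp hc)
        rw [huniq kv hkv (kind, toks) hmemk hk1] at hkg
        rw [hq] at hkg; cases hkg
    rcases hkey with h | h | h <;> subst h
    · rw [show PySem.Dict.get? pvKindTokens "excel"
          = some ["excel", "xlsx", "表", "列", "columns", "table"] from by decide]
      rw [Option.getD_some, hcont ["excel", "xlsx", "表", "列", "columns", "table"] (by rw [items_eq]; simp)]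
    · rw [show PySem.Dict.get? pvKindTokens "word"
          = some ["word", "docx", "見出し", "章", "アウトライン", "outline", "document"] from by decide]
      rw [Option.getD_some, hcont ["word", "docx", "見出し", "章", "アウトライン", "outline", "document"] (by rw [items_eq]; simp)]
    · rw [show PySem.Dict.get? pvKindTokens "ppt"
          = some ["ppt", "pptx", "powerpoint", "スライド", "slides", "slide"] from by decide]
      rw [Option.getD_some, hcont ["ppt", "pptx", "powerpoint", "スライド", "slides", "slide"] (by rw [items_eq]; simp)]
  · -- no kind mentioned: both generic
    rw [Bool.not_eq_true] at hany
    have hempty : found = [] := by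
      rw [List.eq_nil_iff_forall_not_mem]
      intro y hy
      obtain ⟨kv, hkv, _, hkg⟩ := (hm y).mp hy
      have h2 : ∀ a b, (a, b) ∈ pvKindTokens.items → ∀ x ∈ b, g x = false := by
        simpa [List.any_map, List.any_eq_false] using hany
      have h3 : kv.2.any g = false := List.any_eq_false.mpr (fun x hx => by rw [h2 kv.1 kv.2 (by simpa using hkv) x hx]; simp)
      rw [hkg] at h3; cases h3
    rw [hany, hempty]
    rfl


-- ===== VERDICT (by name: the statement is the Claim_ definition above) =====
theorem meaning_gate_py_spec : Claim_equal_meaning_gate_py := by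
  intro prompt kind _ hpre
  unfold Spec_meaning_gate_py
  exact gate_eq' prompt kind hpre
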